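-- pv_equiv track=rewrite | github.com/brachiWeil/PytonProject | Users.py | match_email_username
-- ===== SOURCE A (Python) =====
-- def match_email_username(emails, usernames):
--     email_username_match = {}
--     for email in emails:
--         for username in usernames:
--             if username.lower() in email.lower():
--                 email_username_match[email] = True
--                 break
--         else:
--             email_username_match[email] = False
--     return email_username_match
-- ===== SOURCE B (Python) =====
-- def match_email_username(emails, usernames):
--     # Username-major scan over a shrinking worklist of UNIQUE emails, with
--     # unique usernames: every distinct string is lowered and tested at most
--     # once, and an email leaves the worklist as soon as it matches.
--     remaining = [(e, e.lower()) for e in dict.fromkeys(emails)]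
--     matched = set()
--     for u in dict.fromkeys(usernames):
--         if not remaining:
--             break
--         p = u.lower()
--         still = []
--         for e, el in remaining:
--             if p in el:
--                 matched.add(e)
--             else:
--                 still.append((e, el))
--         remaining = still
--     return {e: e in matched for e in emails}
-- ===== Notes on version B (the rewrite author's own statement) =====
-- stated objective: faster
-- what changed: B replaces A's per-email scan over all usernames (re-lowering both strings in every inner iteration) by a username-major scan of unique usernames over a shrinking worklist of unique pre-lowered emails with a matched-set accumulator, so each distinct string is lowered once and matched emails leave the scan.
import Mathlib
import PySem

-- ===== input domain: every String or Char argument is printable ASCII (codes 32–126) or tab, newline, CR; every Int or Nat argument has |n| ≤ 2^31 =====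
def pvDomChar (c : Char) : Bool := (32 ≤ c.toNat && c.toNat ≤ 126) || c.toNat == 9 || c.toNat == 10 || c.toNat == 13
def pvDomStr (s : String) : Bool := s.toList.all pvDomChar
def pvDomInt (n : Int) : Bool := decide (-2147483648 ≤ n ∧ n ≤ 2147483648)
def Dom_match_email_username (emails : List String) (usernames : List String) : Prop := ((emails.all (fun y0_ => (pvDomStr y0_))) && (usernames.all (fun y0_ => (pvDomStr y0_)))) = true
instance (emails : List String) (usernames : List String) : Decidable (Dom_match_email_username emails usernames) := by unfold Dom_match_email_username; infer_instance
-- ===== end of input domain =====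

-- B: username-major scan of unique usernames over a shrinking worklist of unique pre-lowered emails (each distinct string lowered/tested at most once); same return value, measured faster in a timing run.
-- ===== PORT A =====
-- inner 'for username in usernames: … break / else' body of A, acting on the dict
def pvALoop (d : PySem.Dict String Bool) (email : String) : List String → PySem.Dict String Bool
  | [] => d.insert email false                      -- the for/else branch
  | u :: rest =>
      if PySem.Str.isIn (PySem.Str.lower u) (PySem.Str.lower email) then
        d.insert email true                          -- then break
      else pvALoop d email rest

def match_email_username (emails : List String) (usernames : List String) : List (String × Bool) :=
  (emails.foldl (fun d email => pvALoop d email usernames) PySem.Dict.empty).items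

-- ===== PORT B =====
-- B's 'for u in …' loop with its 'if not remaining: break'; the inner 'for e, el in remaining'
-- loop is the foldl over the (matched, still) pair state
def pvBOuter : List String → PySem.Set String → List (String × String) → PySem.Set String
  | [], m, _ => m
  | u :: rest, m, remaining =>
      if remaining.isEmpty then m
      else
        let p := PySem.Str.lower u
        let s := remaining.foldl (fun acc pr =>
            if PySem.Str.isIn p pr.2 then (PySem.Set.add acc.1 pr.1, acc.2)
            else (acc.1, acc.2 ++ [pr])) (m, ([] : List (String × String)))
        pvBOuter rest s.1 s.2

def match_email_username_alt (emails : List String) (usernames : List String) : List (String × Bool) :=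
  let remaining := (PySem.List.dedup emails).map (fun e => (e, PySem.Str.lower e))
  let matched := pvBOuter (PySem.List.dedup usernames) PySem.Set.empty remaining
  (emails.foldl (fun d e => d.insert e (PySem.Set.contains matched e)) PySem.Dict.empty).items

-- ===== PRECONDITION & SPEC =====
def Spec_match_email_username (emails : List String) (usernames : List String) (out : List (String × Bool)) : Prop := out = match_email_username_alt emails usernames
instance (emails : List String) (usernames : List String) (out : List (String × Bool)) : Decidable (Spec_match_email_username emails usernames out) := by unfold Spec_match_email_username; infer_instance

-- ===== CLAIM (what is proved, stated in full; the proofs are below) =====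
def Claim_equal_match_email_username : Prop := ∀ (emails : List String) (usernames : List String), Dom_match_email_username emails usernames → Spec_match_email_username emails usernames (match_email_username emails usernames)

-- ===== LEMMAS AND PROOFS =====
-- A's inner loop computes: insert the 'any username is a (case-folded) substring' flag
theorem pvALoop_eq (d : PySem.Dict String Bool) (email : String) (us : List String) :
    pvALoop d email us
      = d.insert email (us.any (fun u => PySem.Str.isIn (PySem.Str.lower u) (PySem.Str.lower email))) := by
  induction us with
  | nil => rfl
  | cons u rest ih =>
      simp only [pvALoop]
      split_ifs with h
      · rw [List.any_cons, h, Bool.true_or]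
      · rw [Bool.not_eq_true] at h
        rw [ih, List.any_cons, h, Bool.false_or]

-- one pass of B's inner loop: the matched component collects the hits …
theorem pvPass_fst_mem (p : String) (remaining : List (String × String))
    (m : PySem.Set String) (acc : List (String × String)) (x : String) :
    x ∈ (remaining.foldl (fun acc pr =>
          if PySem.Str.isIn p pr.2 then (PySem.Set.add acc.1 pr.1, acc.2)
          else (acc.1, acc.2 ++ [pr])) (m, acc)).1
      ↔ x ∈ m ∨ ∃ el, (x, el) ∈ remaining ∧ PySem.Str.isIn p el = true := by
  induction remaining generalizing m acc with
  | nil => simp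
  | cons pr rest ih =>
      obtain ⟨e1, el1⟩ := pr
      simp only [List.foldl_cons, List.mem_cons, Prod.mk.injEq]
      by_cases hi : PySem.Str.isIn p el1 = true
      · rw [if_pos hi, ih]
        constructor
        · rintro (h | ⟨el, hel, hin⟩)
          · rcases (PySem.Set.mem_add m e1 x).mp h with h' | h'
            · exact Or.inl h'
            · exact Or.inr ⟨el1, Or.inl ⟨h', rfl⟩, hi⟩
          · exact Or.inr ⟨el, Or.inr hel, hin⟩
        · rintro (h | ⟨el, ⟨hx, hel⟩ | hel, hin⟩)
          · exact Or.inl ((PySem.Set.mem_add m e1 x).mpr (Or.inl h))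
          · exact Or.inl ((PySem.Set.mem_add m e1 x).mpr (Or.inr hx))
          · exact Or.inr ⟨el, hel, hin⟩
      · rw [if_neg hi, ih]
        constructor
        · rintro (h | ⟨el, hel, hin⟩)
          · exact Or.inl h
          · exact Or.inr ⟨el, Or.inr hel, hin⟩
        · rintro (h | ⟨el, ⟨hx, hel⟩ | hel, hin⟩)
          · exact Or.inl h
          · exact absurd (hel ▸ hin) hi
          · exact Or.inr ⟨el, hel, hin⟩

-- … and the still component keeps exactly the misses, in order
theorem pvPass_snd (p : String) (remaining : List (String × String))
    (m : PySem.Set String) (acc : List (String × String)) :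
    (remaining.foldl (fun acc pr =>
          if PySem.Str.isIn p pr.2 then (PySem.Set.add acc.1 pr.1, acc.2)
          else (acc.1, acc.2 ++ [pr])) (m, acc)).2
      = acc ++ remaining.filter (fun pr => !PySem.Str.isIn p pr.2) := by
  induction remaining generalizing m acc with
  | nil => simp
  | cons pr rest ih =>
      simp only [List.foldl_cons, List.filter_cons]
      by_cases hi : PySem.Str.isIn p pr.2 = true
      · have hi' : PySem.Chars.isIn p.toList pr.2.toList = true := by simpa using hi
        rw [if_pos hi, ih]; simp [hi']
      · rw [if_neg hi, ih]
        rw [Bool.not_eq_true] at hi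
        have hi' : PySem.Chars.isIn p.toList pr.2.toList = false := by simpa using hi
        simp [hi']

-- membership in B's matched set after the whole username-major scan
theorem pvBOuter_mem (us : List String) (remaining : List (String × String))
    (m : PySem.Set String) (x : String) :
    x ∈ pvBOuter us m remaining
      ↔ x ∈ m ∨ ∃ u ∈ us, ∃ el, (x, el) ∈ remaining ∧ PySem.Str.isIn (PySem.Str.lower u) el = true := by
  induction us generalizing m remaining with
  | nil => simp [pvBOuter]
  | cons u rest ih =>
      simp only [pvBOuter]
      by_cases hre : remaining.isEmpty
      · rw [if_pos hre]
        rw [List.isEmpty_iff] at hre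
        subst hre
        simp
      · rw [if_neg hre]
        simp only [ih, pvPass_fst_mem, pvPass_snd, List.nil_append, List.mem_cons]
        constructor
        · rintro ((h | ⟨el, hel, hin⟩) | ⟨v, hv, el, hel, hin⟩)
          · exact Or.inl h
          · exact Or.inr ⟨u, Or.inl rfl, el, hel, hin⟩
          · exact Or.inr ⟨v, Or.inr hv, el, (List.mem_filter.mp hel).1, hin⟩
        · rintro (h | ⟨v, hv | hv, el, hel, hin⟩)
          · exact Or.inl (Or.inl h)
          · exact Or.inl (Or.inr ⟨el, hel, hv ▸ hin⟩)
          · by_cases hu : PySem.Str.isIn (PySem.Str.lower u) el = true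
            · exact Or.inl (Or.inr ⟨el, hel, hu⟩)
            · refine Or.inr ⟨v, hv, el, List.mem_filter.mpr ⟨hel, ?_⟩, hin⟩
              rw [Bool.not_eq_true] at hu
              have hu' : PySem.Chars.isIn (PySem.Chars.lower u.toList) el.toList = false := by
                simpa using hu
              simp [hu']

-- for an email of the list, B's membership flag equals A's 'any' flag
theorem pvFlag_eq (emails usernames : List String) (e : String) (he : e ∈ emails) :
    PySem.Set.contains
      (pvBOuter (PySem.List.dedup usernames) PySem.Set.empty
        ((PySem.List.dedup emails).map (fun e => (e, PySem.Str.lower e)))) e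
      = usernames.any (fun u => PySem.Str.isIn (PySem.Str.lower u) (PySem.Str.lower e)) := by
  rcases h : usernames.any (fun u => PySem.Str.isIn (PySem.Str.lower u) (PySem.Str.lower e)) with _ | _
  · rw [List.any_eq_false] at h
    rcases hc : PySem.Set.contains _ e with _ | _
    · rfl
    · exfalso
      have hmem := (PySem.Set.contains_iff _ e).mp hc
      rw [pvBOuter_mem] at hmem
      rcases hmem with h0 | ⟨u, hu, el, hel, hin⟩
      · simp [PySem.Set.empty] at h0
      · obtain ⟨e', he', heq⟩ := List.mem_map.mp hel
        have h2 : PySem.Str.lower e' = el := congrArg Prod.snd heq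
        have h1 : e' = e := congrArg Prod.fst heq
        rw [← h2, h1] at hin
        exact h u ((PySem.List.mem_dedup ..).mp hu) hin
  · rw [List.any_eq_true] at h
    obtain ⟨u, hu, hin⟩ := h
    apply (PySem.Set.contains_iff _ e).mpr
    rw [pvBOuter_mem]
    exact Or.inr ⟨u, (PySem.List.mem_dedup ..).mpr hu, PySem.Str.lower e,
      List.mem_map.mpr ⟨e, (PySem.List.mem_dedup ..).mpr he, rfl⟩, hin⟩

-- A's email loop equals B's dict-comprehension fold once the flags agree pointwise
theorem pvMain (usernames : List String) (M : PySem.Set String) :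
    ∀ (emails : List String) (d : PySem.Dict String Bool),
    (∀ e ∈ emails, PySem.Set.contains M e
        = usernames.any (fun u => PySem.Str.isIn (PySem.Str.lower u) (PySem.Str.lower e))) →
    emails.foldl (fun d email => pvALoop d email usernames) d
      = emails.foldl (fun d e => d.insert e (PySem.Set.contains M e)) d := by
  intro emails
  induction emails with
  | nil => intro d _; rfl
  | cons e rest ih =>
      intro d hM
      simp only [List.foldl_cons]
      rw [pvALoop_eq, ← hM e (List.mem_cons_self ..)]
      exact ih _ (fun x hx => hM x (List.mem_cons_of_mem _ hx))

-- ===== VERDICT (by name: the statement is the Claim_ definition above) =====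
theorem match_email_username_spec : Claim_equal_match_email_username := by
  intro emails usernames _
  unfold Spec_match_email_username
  simp only [match_email_username, match_email_username_alt]
  congr 1
  exact pvMain usernames _ emails PySem.Dict.empty
    (fun e he => pvFlag_eq emails usernames e he)
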